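-- pv_equiv track=rewrite | github.com/Artyom-Martuchenko/elma_soft_task | solution.py | solve_task
-- ===== SOURCE A (Python) =====
-- def solve_task(input_list):
--     i = 0
--     length = len(input_list)
--     while i < length - 1:
--         max_element = [0, 0]
--         for j in range(input_list[i], 0, -1):
--             if i + j < length and input_list[i + j] > max_element[0] or i + j == length - 1:
--                 max_element = [input_list[i + j], i + j]
--         if max_element[1] == 0:
--             return False
--         else:
--             i = max_element[1]
--     return True
-- ===== SOURCE B (Python) =====
-- def solve_task(input_list):
--     n = len(input_list)
--     if n <= 1:
--         return True
--     # Sparse table: table[p][l] = index of the lexicographic maximum of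
--     # (value, index) over the window [l, l + 2**p - 1].  Built once in
--     # O(n log n); each jump of the walk is then answered by two O(1) lookups.
--     def better(x, y):
--         if input_list[y] > input_list[x] or (input_list[y] == input_list[x] and y > x):
--             return y
--         return x
--     table = [list(range(n))]
--     p = 1
--     while (1 << p) <= n:
--         prev = table[p - 1]
--         half = 1 << (p - 1)
--         table.append([better(prev[l], prev[l + half])
--                       for l in range(n - (1 << p) + 1)])
--         p += 1
--     def query(lo, hi):  # argmax of (value, index) over [lo, hi], lo <= hi
--         p = (hi - lo + 1).bit_length() - 1
--         return better(table[p][lo], table[p][hi - (1 << p) + 1])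
--     i = 0
--     while i < n - 1:
--         hi = min(i + input_list[i], n - 1)
--         if hi <= i:
--             return False
--         t = query(i + 1, hi)
--         if input_list[t] <= 0 and hi != n - 1:
--             return False
--         i = t
--     return True
-- ===== Notes on version B (the rewrite author's own statement) =====
-- stated objective: faster
-- what changed: B precomputes a sparse-table RMQ (index of the lexicographic maximum of (value, index) over every power-of-two window) and answers each greedy jump with two O(1) table lookups, instead of A's per-step descending scan over range(input_list[i]) whose cost is proportional to the stored value.
import Mathlib
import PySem

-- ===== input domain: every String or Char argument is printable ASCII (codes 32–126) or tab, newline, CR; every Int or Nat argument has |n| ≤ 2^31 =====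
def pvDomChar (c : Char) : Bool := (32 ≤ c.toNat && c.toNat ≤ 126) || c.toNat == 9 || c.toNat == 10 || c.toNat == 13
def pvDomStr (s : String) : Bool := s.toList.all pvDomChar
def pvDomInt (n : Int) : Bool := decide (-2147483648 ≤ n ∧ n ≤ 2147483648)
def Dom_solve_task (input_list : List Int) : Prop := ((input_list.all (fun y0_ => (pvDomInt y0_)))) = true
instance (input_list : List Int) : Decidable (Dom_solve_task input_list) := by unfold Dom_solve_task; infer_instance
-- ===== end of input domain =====

-- B replaces A's per-step descending scan over range(input_list[i]) (cost proportional to the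
-- stored value) by a sparse table of argmax-(value, index) indices built once, each jump then
-- answered by two table lookups; objective: faster. Equivalence of the return value is proved below.

-- ===== PORT A =====

-- input_list[k] (total helper; every access the programs make is in range)
def pvVal (a : List Int) (k : Int) : Int := PySem.List.pyGetD a k 0

-- the body of A's inner `for j in range(input_list[i], 0, -1)` loop
def pvFA (a : List Int) (n i : Int) (m : Int × Int) (j : Int) : Int × Int :=
  if (i + j < n ∧ pvVal a (i + j) > m.1) ∨ i + j = n - 1 then (pvVal a (i + j), i + j) else m

-- one execution of A's inner loop: max_element = [0, 0]; for j in range(...): ...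
def pvStepA (a : List Int) (n i : Int) : Int × Int :=
  (PySem.List.pyRange (pvVal a i) 0 (-1)).foldl (pvFA a n i) (0, 0)

-- needed by pvGoA's termination proof: the selected index is 0 or beyond i
lemma pvFoldA_inv (a : List Int) (n i : Int) :
    ∀ (ls : List Int), (∀ j ∈ ls, 0 < j) → ∀ (m : Int × Int), (m.2 = 0 ∨ i < m.2) →
      ((ls.foldl (pvFA a n i) m).2 = 0 ∨ i < (ls.foldl (pvFA a n i) m).2) := by
  intro ls
  induction ls with
  | nil => intro _ m hm; exact hm
  | cons x tl ih =>
    intro h m hm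
    rw [List.foldl_cons]
    apply ih (fun j hj => h j (List.mem_cons_of_mem _ hj))
    unfold pvFA
    split
    · right
      have hx := h x (by simp)
      show i < i + x
      omega
    · exact hm

lemma pvStepA_snd (a : List Int) (n i : Int) :
    (pvStepA a n i).2 = 0 ∨ i < (pvStepA a n i).2 := by
  unfold pvStepA
  apply pvFoldA_inv
  · intro j hj
    rw [PySem.List.mem_pyRange_neg_one] at hj
    exact hj.1
  · left; rfl

-- A's while loop
def pvGoA (a : List Int) (n i : Int) : Bool :=
  if h1 : i < n - 1 then
    if h2 : (pvStepA a n i).2 = 0 then false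
    else pvGoA a n (pvStepA a n i).2
  else true
termination_by (n - 1 - i).toNat
decreasing_by
  rcases pvStepA_snd a n i with h3 | h3
  · exact absurd h3 h2
  · omega

def solve_task (input_list : List Int) : Bool :=
  pvGoA input_list (input_list.length : Int) 0

-- ===== PORT B =====

-- better(x, y): the index whose (value, index) pair is lexicographically larger
def pvBetter (a : List Int) (x y : Int) : Int :=
  if pvVal a y > pvVal a x ∨ (pvVal a y = pvVal a x ∧ y > x) then y else x

-- table[p] of Source B: row p of the sparse table (Source B builds the rows bottom-up in a
-- list; here row p is obtained from row p-1 by the same map over the same range)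
def pvRow (a : List Int) (n : Int) : Nat → List Int
  | 0 => PySem.List.pyRange 0 n 1
  | p + 1 => (PySem.List.pyRange 0 (n - (2 : Int) ^ (p + 1) + 1) 1).map
      (fun l => pvBetter a (pvVal (pvRow a n p) l) (pvVal (pvRow a n p) (l + (2 : Int) ^ p)))

-- query(lo, hi): (hi-lo+1).bit_length()-1 = Nat.log2 for a positive window length
def pvQuery (a : List Int) (n lo hi : Int) : Int :=
  pvBetter a (pvVal (pvRow a n (Nat.log2 (hi - lo + 1).toNat)) lo)
    (pvVal (pvRow a n (Nat.log2 (hi - lo + 1).toNat)) (hi - (2 : Int) ^ (Nat.log2 (hi - lo + 1).toNat) + 1))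

-- B's while loop; the final `if h3 : i < …` is a totality guard only: from the entry
-- point i = 0 the queried index always exceeds i (established in the proofs below)
def pvGoB (a : List Int) (n i : Int) : Bool :=
  if h1 : i < n - 1 then
    if h2 : min (i + pvVal a i) (n - 1) ≤ i then false
    else
      if pvVal a (pvQuery a n (i + 1) (min (i + pvVal a i) (n - 1))) ≤ 0 ∧
          min (i + pvVal a i) (n - 1) ≠ n - 1 then false
      else if h3 : i < pvQuery a n (i + 1) (min (i + pvVal a i) (n - 1)) then
        pvGoB a n (pvQuery a n (i + 1) (min (i + pvVal a i) (n - 1)))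
      else false
  else true
termination_by (n - 1 - i).toNat
decreasing_by omega

def solve_task_alt (input_list : List Int) : Bool :=
  pvGoB input_list (input_list.length : Int) 0

-- ===== PRECONDITION & SPEC =====
def Spec_solve_task (input_list : List Int) (out : Bool) : Prop := out = solve_task_alt input_list
instance (input_list : List Int) (out : Bool) : Decidable (Spec_solve_task input_list out) := by unfold Spec_solve_task; infer_instance

-- ===== CLAIM (what is proved, stated in full; the proofs are below) =====
def Claim_equal_solve_task : Prop := ∀ (input_list : List Int), Dom_solve_task input_list → Spec_solve_task input_list (solve_task input_list)

-- ===== LEMMAS AND PROOFS =====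

-- t is the index of the lexicographic maximum of (value, index) over [lo, hi]
def pvBestP (a : List Int) (lo hi t : Int) : Prop :=
  lo ≤ t ∧ t ≤ hi ∧ ∀ k, lo ≤ k → k ≤ hi →
    pvVal a k < pvVal a t ∨ (pvVal a k = pvVal a t ∧ k ≤ t)

-- combining the champions of two covering windows
lemma pvBetter_merge (a : List Int) (lo1 hi1 lo2 hi2 x y : Int)
    (hx : pvBestP a lo1 hi1 x) (hy : pvBestP a lo2 hi2 y)
    (h12 : lo1 ≤ lo2) (hcov : lo2 ≤ hi1 + 1) (hh : hi1 ≤ hi2) :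
    pvBestP a lo1 hi2 (pvBetter a x y) := by
  obtain ⟨hx1, hx2, hxd⟩ := hx
  obtain ⟨hy1, hy2, hyd⟩ := hy
  unfold pvBetter
  split
  · refine ⟨by omega, by omega, ?_⟩
    intro k hk1 hk2
    by_cases hk : k ≤ hi1
    · have := hxd k hk1 hk
      omega
    · have := hyd k (by omega) hk2
      omega
  · refine ⟨by omega, by omega, ?_⟩
    intro k hk1 hk2
    by_cases hk : k ≤ hi1
    · exact hxd k hk1 hk
    · have := hyd k (by omega) hk2
      omega

-- base row of the sparse table reads back its own index
lemma pvVal_pyRange (n l : Int) (h0 : 0 ≤ l) (hn : l < n) :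
    pvVal (PySem.List.pyRange 0 n 1) l = l := by
  unfold pvVal
  conv_lhs => rw [show PySem.List.pyRange 0 n 1 = (PySem.List.pyRange 0 n 1).map (fun x => x) from
    (List.map_id' _).symm]
  rw [PySem.List.pyGetD_map_pyRange_of_nonneg _ _ _ _ h0 hn]

-- row invariant: entry l of row p is the champion of the window [l, l + 2^p - 1]
lemma pvRow_best (a : List Int) (n : Int) :
    ∀ (p : Nat) (l : Int), 0 ≤ l → l + (2 : Int) ^ p ≤ n →
      pvBestP a l (l + (2 : Int) ^ p - 1) (pvVal (pvRow a n p) l) := by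
  intro p
  induction p with
  | zero =>
    intro l h0 hn
    norm_num at hn ⊢
    rw [show pvRow a n 0 = PySem.List.pyRange 0 n 1 from rfl, pvVal_pyRange n l h0 (by omega)]
    refine ⟨le_refl l, le_refl l, fun k hk1 hk2 => ?_⟩
    have hkl : k = l := by omega
    subst hkl
    exact Or.inr ⟨rfl, le_refl k⟩
  | succ p ih =>
    intro l h0 hn
    have hPpos : (0 : Int) < (2 : Int) ^ p := by positivity
    have hP2 : (2 : Int) ^ (p + 1) = (2 : Int) ^ p * 2 := pow_succ 2 p
    have hval : pvVal (pvRow a n (p + 1)) l =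
        pvBetter a (pvVal (pvRow a n p) l) (pvVal (pvRow a n p) (l + (2 : Int) ^ p)) := by
      rw [show pvRow a n (p + 1) = (PySem.List.pyRange 0 (n - (2 : Int) ^ (p + 1) + 1) 1).map
        (fun l => pvBetter a (pvVal (pvRow a n p) l) (pvVal (pvRow a n p) (l + (2 : Int) ^ p)))
        from rfl]
      unfold pvVal
      rw [PySem.List.pyGetD_map_pyRange_of_nonneg _ _ _ _ h0 (by omega)]
    rw [hval]
    have h1 := ih l h0 (by omega)
    have h2 := ih (l + (2 : Int) ^ p) (by omega) (by omega)
    have hm := pvBetter_merge a l (l + (2 : Int) ^ p - 1) (l + (2 : Int) ^ p)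
      (l + (2 : Int) ^ p + (2 : Int) ^ p - 1) _ _ h1 h2 (by omega) (by omega) (by omega)
    have he : l + (2 : Int) ^ p + (2 : Int) ^ p - 1 = l + (2 : Int) ^ (p + 1) - 1 := by
      rw [hP2]; ring
    rwa [he] at hm

-- the query answers with the champion of [lo, hi]
lemma pvQuery_best (a : List Int) (n lo hi : Int)
    (h0 : 0 ≤ lo) (hlh : lo ≤ hi) (hhn : hi + 1 ≤ n) :
    pvBestP a lo hi (pvQuery a n lo hi) := by
  have hm1 : 1 ≤ (hi - lo + 1).toNat := by omega
  have hmne : (hi - lo + 1).toNat ≠ 0 := by omega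
  have hpl : 2 ^ (Nat.log2 (hi - lo + 1).toNat) ≤ (hi - lo + 1).toNat := by
    rw [Nat.log2_eq_log_two]
    exact Nat.pow_log_le_self 2 hmne
  have hpu : (hi - lo + 1).toNat < 2 ^ (Nat.log2 (hi - lo + 1).toNat + 1) := by
    rw [Nat.log2_eq_log_two]
    exact Nat.lt_pow_succ_log_self (by norm_num) _
  have hcast : ((2 ^ (Nat.log2 (hi - lo + 1).toNat) : Nat) : Int)
      = (2 : Int) ^ (Nat.log2 (hi - lo + 1).toNat) := by push_cast; ring
  have hPm : (2 : Int) ^ (Nat.log2 (hi - lo + 1).toNat) ≤ hi - lo + 1 := by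
    rw [← hcast]
    omega
  have hPm2 : hi - lo + 1 < 2 * (2 : Int) ^ (Nat.log2 (hi - lo + 1).toNat) := by
    have : ((2 ^ (Nat.log2 (hi - lo + 1).toNat + 1) : Nat) : Int)
        = 2 * (2 : Int) ^ (Nat.log2 (hi - lo + 1).toNat) := by push_cast [pow_succ]; ring
    omega
  have hPpos : (0 : Int) < (2 : Int) ^ (Nat.log2 (hi - lo + 1).toNat) := by positivity
  unfold pvQuery
  have h1 := pvRow_best a n (Nat.log2 (hi - lo + 1).toNat) lo h0 (by omega)
  have h2 := pvRow_best a n (Nat.log2 (hi - lo + 1).toNat)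
    (hi - (2 : Int) ^ (Nat.log2 (hi - lo + 1).toNat) + 1) (by omega) (by omega)
  have hm := pvBetter_merge a lo (lo + (2 : Int) ^ (Nat.log2 (hi - lo + 1).toNat) - 1)
    (hi - (2 : Int) ^ (Nat.log2 (hi - lo + 1).toNat) + 1)
    (hi - (2 : Int) ^ (Nat.log2 (hi - lo + 1).toNat) + 1 + (2 : Int) ^ (Nat.log2 (hi - lo + 1).toNat) - 1)
    _ _ h1 h2 (by omega) (by omega) (by omega)
  have he : hi - (2 : Int) ^ (Nat.log2 (hi - lo + 1).toNat) + 1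
      + (2 : Int) ^ (Nat.log2 (hi - lo + 1).toNat) - 1 = hi := by ring
  rwa [he] at hm

-- splitting a descending range
lemma pyRangeSplit : ∀ (d : Nat) (v w : Int), 0 ≤ w → v = w + (d : Int) →
    PySem.List.pyRange v 0 (-1) = PySem.List.pyRange v w (-1) ++ PySem.List.pyRange w 0 (-1) := by
  intro d
  induction d with
  | zero =>
    intro v w h0 hv
    have hvw : v = w := by push_cast at hv; omega
    subst hvw
    rw [PySem.List.pyRange_neg_one_eq_nil (le_refl v), List.nil_append]
  | succ d ih =>
    intro v w h0 hv
    have hv0 : (0 : Int) < v := by push_cast at hv; omega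
    have hwv : w < v := by push_cast at hv; omega
    rw [PySem.List.pyRange_neg_one_cons hv0, PySem.List.pyRange_neg_one_cons hwv]
    rw [ih (v - 1) w h0 (by push_cast at hv ⊢; omega), List.cons_append]

-- offsets past the end of the list leave A's accumulator unchanged
lemma pvFA_noop (a : List Int) (n i : Int) :
    ∀ (ls : List Int), (∀ j ∈ ls, n ≤ i + j) → ∀ m, ls.foldl (pvFA a n i) m = m := by
  intro ls
  induction ls with
  | nil => intro _ m; rfl
  | cons x tl ih =>
    intro h m
    rw [List.foldl_cons]
    have hx : pvFA a n i m x = m := by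
      unfold pvFA
      rw [if_neg]
      rintro (⟨hlt, -⟩ | heq) <;> [skip; skip] <;>
        · have := h x (by simp)
          omega
    rw [hx]
    exact ih (fun j hj => h j (List.mem_cons_of_mem _ hj)) m

-- characterisation of A's inner fold over a window that stays strictly below index n-1
lemma descfoldA (a : List Int) (n i : Int) :
    ∀ (K : Nat), i + (K : Int) ≤ n - 2 → ∀ (m : Int × Int),
      ((PySem.List.pyRange (K : Int) 0 (-1)).foldl (pvFA a n i) m = m ∧
        ∀ j : Int, 0 < j → j ≤ (K : Int) → pvVal a (i + j) ≤ m.1) ∨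
      (∃ j0 : Int, 0 < j0 ∧ j0 ≤ (K : Int) ∧
        (PySem.List.pyRange (K : Int) 0 (-1)).foldl (pvFA a n i) m = (pvVal a (i + j0), i + j0) ∧
        m.1 < pvVal a (i + j0) ∧
        ∀ j : Int, 0 < j → j ≤ (K : Int) →
          (pvVal a (i + j) ≤ pvVal a (i + j0) ∧ (pvVal a (i + j) = pvVal a (i + j0) → j ≤ j0))) := by
  intro K
  induction K with
  | zero =>
    intro _ m
    left
    constructor
    · rw [show ((0 : Nat) : Int) = 0 from rfl, PySem.List.pyRange_neg_one_eq_nil (le_refl 0)]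
      rfl
    · intro j hj1 hj2
      norm_num at hj2
      omega
  | succ K ih =>
    intro hK m
    have hcons : PySem.List.pyRange ((K + 1 : Nat) : Int) 0 (-1)
        = ((K + 1 : Nat) : Int) :: PySem.List.pyRange (K : Int) 0 (-1) := by
      have hc1 : ((K + 1 : Nat) : Int) - 1 = (K : Int) := by push_cast; ring
      rw [PySem.List.pyRange_neg_one_cons (by push_cast; omega : (0 : Int) < ((K + 1 : Nat) : Int)), hc1]
    rw [hcons, List.foldl_cons]
    have hK' : i + (K : Int) ≤ n - 2 := by push_cast at hK ⊢; omega
    have hfe : pvFA a n i m ((K + 1 : Nat) : Int) =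
        (if m.1 < pvVal a (i + ((K + 1 : Nat) : Int))
          then (pvVal a (i + ((K + 1 : Nat) : Int)), i + ((K + 1 : Nat) : Int)) else m) := by
      unfold pvFA
      by_cases hgt : pvVal a (i + ((K + 1 : Nat) : Int)) > m.1
      · rw [if_pos (Or.inl ⟨by push_cast at hK ⊢; omega, hgt⟩), if_pos hgt]
      · rw [if_neg ?_, if_neg hgt]
        rintro (⟨-, hg⟩ | heq)
        · exact hgt hg
        · push_cast at hK heq; omega
    rw [hfe]
    by_cases hgt : m.1 < pvVal a (i + ((K + 1 : Nat) : Int))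
    · rw [if_pos hgt]
      rcases ih hK' (pvVal a (i + ((K + 1 : Nat) : Int)), i + ((K + 1 : Nat) : Int)) with
        ⟨hr, hall⟩ | ⟨j0, hj1, hj2, hr, hm1, hall⟩
      · right
        refine ⟨((K + 1 : Nat) : Int), by push_cast; omega, le_refl _, hr, hgt, ?_⟩
        intro j hj1 hj2
        by_cases hje : j = ((K + 1 : Nat) : Int)
        · subst hje; exact ⟨le_refl _, fun _ => le_refl _⟩
        · have h5 := hall j hj1 (by push_cast at hj2 ⊢; omega)
          have h5' : pvVal a (i + j) ≤ pvVal a (i + ((K + 1 : Nat) : Int)) := h5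
          exact ⟨h5', fun _ => by push_cast at hj2 ⊢; omega⟩
      · right
        have hm1' : pvVal a (i + ((K + 1 : Nat) : Int)) < pvVal a (i + j0) := hm1
        refine ⟨j0, hj1, by push_cast at hj2 ⊢; omega, hr, lt_trans hgt hm1', ?_⟩
        intro j hj1' hj2'
        by_cases hje : j = ((K + 1 : Nat) : Int)
        · subst hje
          exact ⟨le_of_lt hm1', fun he => absurd he (ne_of_lt hm1')⟩
        · exact hall j hj1' (by push_cast at hj2' ⊢; omega)
    · rw [if_neg hgt]
      rcases ih hK' m with ⟨hr, hall⟩ | ⟨j0, hj1, hj2, hr, hm1, hall⟩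
      · left
        refine ⟨hr, ?_⟩
        intro j hj1 hj2
        by_cases hje : j = ((K + 1 : Nat) : Int)
        · subst hje; omega
        · exact hall j hj1 (by push_cast at hj2 ⊢; omega)
      · right
        refine ⟨j0, hj1, by push_cast at hj2 ⊢; omega, hr, hm1, ?_⟩
        intro j hj1' hj2'
        by_cases hje : j = ((K + 1 : Nat) : Int)
        · subst hje
          constructor
          · omega
          · intro he; omega
        · exact hall j hj1' (by push_cast at hj2' ⊢; omega)

-- A's inner loop when the window does not reach index n-1
lemma stepA_mid (a : List Int) (n i : Int) (hv : 1 ≤ pvVal a i) (hMid : i + pvVal a i ≤ n - 2) :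
    (pvStepA a n i = (0, 0) ∧ ∀ k, i + 1 ≤ k → k ≤ i + pvVal a i → pvVal a k ≤ 0) ∨
    (∃ t, i + 1 ≤ t ∧ t ≤ i + pvVal a i ∧ 0 < pvVal a t ∧ pvStepA a n i = (pvVal a t, t) ∧
      ∀ k, i + 1 ≤ k → k ≤ i + pvVal a i →
        (pvVal a k ≤ pvVal a t ∧ (pvVal a k = pvVal a t → k ≤ t))) := by
  unfold pvStepA
  have hcast : (((pvVal a i).toNat : Nat) : Int) = pvVal a i := Int.toNat_of_nonneg (by omega)
  have hd := descfoldA a n i (pvVal a i).toNat (by rw [hcast]; omega) ((0 : Int), (0 : Int))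
  rw [hcast] at hd
  rcases hd with ⟨hr, hall⟩ | ⟨j0, hj1, hj2, hr, hm1, hall⟩
  · left
    refine ⟨hr, ?_⟩
    intro k hk1 hk2
    have h5 := hall (k - i) (by omega) (by omega)
    rw [show i + (k - i) = k from by omega] at h5
    exact h5
  · right
    have hm1' : (0 : Int) < pvVal a (i + j0) := hm1
    refine ⟨i + j0, by omega, by omega, hm1', hr, ?_⟩
    intro k hk1 hk2
    have h5 := hall (k - i) (by omega) (by omega)
    rw [show i + (k - i) = k from by omega] at h5
    exact ⟨h5.1, fun he => by have := h5.2 he; omega⟩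

-- A's inner loop when the window reaches index n-1
lemma stepA_hiEnd (a : List Int) (n i : Int) (h1 : i < n - 1)
    (hv : 1 ≤ pvVal a i) (hEnd : n - 1 ≤ i + pvVal a i) :
    ∃ t, i + 1 ≤ t ∧ t ≤ n - 1 ∧ pvStepA a n i = (pvVal a t, t) ∧
      ∀ k, i + 1 ≤ k → k ≤ n - 1 → (pvVal a k ≤ pvVal a t ∧ (pvVal a k = pvVal a t → k ≤ t)) := by
  have hw0 : (0 : Int) ≤ n - 1 - i := by omega
  have hsplit := pyRangeSplit ((pvVal a i) - (n - 1 - i)).toNat (pvVal a i) (n - 1 - i) hw0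
    (by rw [Int.toNat_of_nonneg (by omega)]; omega)
  unfold pvStepA
  rw [hsplit, List.foldl_append]
  rw [pvFA_noop a n i _ (by
        intro j hj
        rw [PySem.List.mem_pyRange_neg_one] at hj
        omega) ((0 : Int), (0 : Int))]
  rw [PySem.List.pyRange_neg_one_cons (by omega : (0 : Int) < n - 1 - i), List.foldl_cons]
  have hfirst : pvFA a n i ((0 : Int), (0 : Int)) (n - 1 - i) = (pvVal a (n - 1), n - 1) := by
    unfold pvFA
    rw [if_pos (Or.inr (by omega))]
    rw [show i + (n - 1 - i) = n - 1 from by omega]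
  rw [hfirst]
  have hcast : (((n - 1 - i - 1).toNat : Nat) : Int) = n - 1 - i - 1 := Int.toNat_of_nonneg (by omega)
  have hd := descfoldA a n i (n - 1 - i - 1).toNat (by rw [hcast]; omega) (pvVal a (n - 1), n - 1)
  rw [hcast] at hd
  rcases hd with ⟨hr, hall⟩ | ⟨j0, hj1, hj2, hr, hm1, hall⟩
  · refine ⟨n - 1, by omega, le_refl _, hr, ?_⟩
    intro k hk1 hk2
    by_cases hk : k = n - 1
    · subst hk; exact ⟨le_refl _, fun _ => le_refl _⟩
    · have h5 := hall (k - i) (by omega) (by omega)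
      rw [show i + (k - i) = k from by omega] at h5
      have h5' : pvVal a k ≤ pvVal a (n - 1) := h5
      exact ⟨h5', fun _ => by omega⟩
  · have hm1' : pvVal a (n - 1) < pvVal a (i + j0) := hm1
    refine ⟨i + j0, by omega, by omega, hr, ?_⟩
    intro k hk1 hk2
    by_cases hk : k = n - 1
    · subst hk
      exact ⟨le_of_lt hm1', fun he => absurd he (ne_of_lt hm1')⟩
    · have h5 := hall (k - i) (by omega) (by omega)
      rw [show i + (k - i) = k from by omega] at h5
      exact ⟨h5.1, fun he => by have := h5.2 he; omega⟩

-- main equivalence of the two while loops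
lemma pvGoEq (a : List Int) (n : Int) :
    ∀ (K : Nat) (i : Int), (n - 1 - i).toNat = K → 0 ≤ i → pvGoA a n i = pvGoB a n i := by
  intro K
  induction K using Nat.strong_induction_on with
  | _ K ih =>
  intro i hK h0
  by_cases h1 : i < n - 1
  · by_cases hv0 : pvVal a i ≤ 0
    · have hsA : pvStepA a n i = (0, 0) := by
        unfold pvStepA
        rw [PySem.List.pyRange_neg_one_eq_nil hv0]
        rfl
      have hA : pvGoA a n i = false := by
        rw [pvGoA]
        simp only [dite_eq_ite]
        rw [if_pos h1, hsA]
        simp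
      have hminle : min (i + pvVal a i) (n - 1) ≤ i := by
        have := min_le_left (i + pvVal a i) (n - 1)
        omega
      have hB : pvGoB a n i = false := by
        rw [pvGoB]
        rw [dif_pos h1, dif_pos hminle]
      rw [hA, hB]
    · -- 1 ≤ input_list[i]
      have hv : 1 ≤ pvVal a i := by omega
      have hhiub : min (i + pvVal a i) (n - 1) ≤ n - 1 := min_le_right _ _
      have hhilb : i + 1 ≤ min (i + pvVal a i) (n - 1) := le_min (by omega) (by omega)
      have h2 : ¬ min (i + pvVal a i) (n - 1) ≤ i := by omega
      obtain ⟨ht1, ht2, hP⟩ := pvQuery_best a n (i + 1) (min (i + pvVal a i) (n - 1))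
        (by omega) (by omega) (by omega)
      have h3 : i < pvQuery a n (i + 1) (min (i + pvVal a i) (n - 1)) := by omega
      have hB : pvGoB a n i =
          (if pvVal a (pvQuery a n (i + 1) (min (i + pvVal a i) (n - 1))) ≤ 0 ∧
              min (i + pvVal a i) (n - 1) ≠ n - 1 then false
           else pvGoB a n (pvQuery a n (i + 1) (min (i + pvVal a i) (n - 1)))) := by
        rw [pvGoB]
        rw [dif_pos h1, dif_neg h2]
        split
        · rfl
        · rfl
      by_cases hEnd : n - 1 ≤ i + pvVal a i
      · have hMeq : min (i + pvVal a i) (n - 1) = n - 1 := min_eq_right (by omega)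
        obtain ⟨tA, htA1, htA2, hsA, hQ⟩ := stepA_hiEnd a n i h1 hv hEnd
        have htt : pvQuery a n (i + 1) (min (i + pvVal a i) (n - 1)) = tA := by
          have h5 := hP tA (by omega) (by omega)
          have h6 := hQ (pvQuery a n (i + 1) (min (i + pvVal a i) (n - 1)))
            (by omega) (by omega)
          omega
        have hA : pvGoA a n i = pvGoA a n tA := by
          rw [pvGoA]
          simp only [dite_eq_ite]
          rw [if_pos h1, hsA]
          rw [if_neg (show ¬ ((pvVal a tA, tA).2 = 0) from by simp; omega)]
        have hB2 : pvGoB a n i = pvGoB a n tA := by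
          rw [hB, htt, if_neg (by rintro ⟨-, hne⟩; exact hne hMeq)]
        rw [hA, hB2]
        exact ih ((n - 1 - tA).toNat) (by omega) tA rfl (by omega)
      · have hMeq : min (i + pvVal a i) (n - 1) = i + pvVal a i := min_eq_left (by omega)
        rcases stepA_mid a n i hv (by omega) with ⟨hsA, hall⟩ | ⟨tA, htA1, htA2, htApos, hsA, hQ⟩
        · have hvt : pvVal a (pvQuery a n (i + 1) (min (i + pvVal a i) (n - 1))) ≤ 0 :=
            hall _ (by omega) (by omega)
          have hA : pvGoA a n i = false := by
            rw [pvGoA]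
            simp only [dite_eq_ite]
            rw [if_pos h1, hsA]
            simp
          have hB2 : pvGoB a n i = false := by
            rw [hB, if_pos ⟨hvt, by omega⟩]
          rw [hA, hB2]
        · have htt : pvQuery a n (i + 1) (min (i + pvVal a i) (n - 1)) = tA := by
            have h5 := hP tA (by omega) (by omega)
            have h6 := hQ (pvQuery a n (i + 1) (min (i + pvVal a i) (n - 1)))
              (by omega) (by omega)
            omega
          have hA : pvGoA a n i = pvGoA a n tA := by
            rw [pvGoA]
            simp only [dite_eq_ite]
            rw [if_pos h1, hsA]
            rw [if_neg (show ¬ ((pvVal a tA, tA).2 = 0) from by simp; omega)]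
          have hB2 : pvGoB a n i = pvGoB a n tA := by
            rw [hB, htt, if_neg (by rintro ⟨hle, -⟩; omega)]
          rw [hA, hB2]
          exact ih ((n - 1 - tA).toNat) (by omega) tA rfl (by omega)
  · rw [pvGoA, pvGoB, dif_neg h1, dif_neg h1]

-- ===== VERDICT (by name: the statement is the Claim_ definition above) =====
theorem solve_task_spec : Claim_equal_solve_task := by
  intro a _
  unfold Spec_solve_task solve_task solve_task_alt
  exact pvGoEq a (a.length : Int) ((a.length : Int) - 1 - 0).toNat 0 rfl (le_refl 0)
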